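-- pv_equiv track=rewrite | github.com/contrust/dns-server | entities/dns_message.py | get_address_partition_from_decompressed_address
-- ===== SOURCE A (Python) =====
-- def get_address_partition_from_decompressed_address(decompressed_address,
--                                                     start, parts):
--     part_start = start + 2
--     len_octet = decompressed_address[start: part_start]
--     if not len_octet:
--         return parts
--     part_end = part_start + (int(len_octet, 16) * 2)
--     parts.append(decompressed_address[part_start:part_end])
--     if (decompressed_address[part_end: part_end + 2] == "00" or
--             part_end > len(decompressed_address)):
--         return parts
--     else:
--         return get_address_partition_from_decompressed_address(
--             decompressed_address, part_end, parts)
-- ===== SOURCE B (Python) =====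
-- def get_address_partition_from_decompressed_address(decompressed_address,
--                                                     start, parts):
--     # Two-pass decomposition: first collect the start offset of every part
--     # (iterative scan), then append the corresponding slices to `parts`.
--     s = decompressed_address
--     n = len(s)
--     positions = []
--     idx = start
--     while s[idx:idx + 2]:
--         positions.append(idx)
--         end = idx + 2 + int(s[idx:idx + 2], 16) * 2
--         if s[end:end + 2] == "00" or end > n:
--             break
--         idx = end
--     for p in positions:
--         end = p + 2 + int(s[p:p + 2], 16) * 2
--         parts.append(s[p + 2:end])
--     return parts
-- ===== Notes on version B (the rewrite author's own statement) =====
-- stated objective: alternative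
-- what changed: Replaced A's parts-threading tail recursion by an iterative two-pass scheme: a while loop first collects the start offset of every part, then a second loop appends the corresponding slices to parts.
import Mathlib
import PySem

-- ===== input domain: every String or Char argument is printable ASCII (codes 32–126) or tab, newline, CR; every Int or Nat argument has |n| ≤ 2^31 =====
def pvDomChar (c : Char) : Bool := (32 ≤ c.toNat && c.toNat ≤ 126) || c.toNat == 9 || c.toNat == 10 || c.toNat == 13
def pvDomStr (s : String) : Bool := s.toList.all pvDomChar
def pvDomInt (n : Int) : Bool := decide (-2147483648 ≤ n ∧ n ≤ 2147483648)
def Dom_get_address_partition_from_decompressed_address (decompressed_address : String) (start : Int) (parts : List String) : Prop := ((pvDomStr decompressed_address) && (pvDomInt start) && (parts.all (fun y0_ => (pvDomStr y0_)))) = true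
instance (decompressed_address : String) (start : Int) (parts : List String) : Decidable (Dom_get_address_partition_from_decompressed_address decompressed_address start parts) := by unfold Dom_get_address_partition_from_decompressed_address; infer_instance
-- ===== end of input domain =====

-- B replaces A's parts-threading tail recursion by a two-pass loop (collect part
-- start offsets, then append the slices); same cost, different decomposition.
-- Both Pythons mutate `parts` in place the same way; the theorems are about the
-- return value.

-- ===== PORT A =====
-- A's tail recursion, with a step counter merely to make the same computation
-- total.  Inside Pre_ the chain of length-octet positions terminates, and a
-- terminating chain visits pairwise-distinct positions of the integer interval
-- [-(len+1), len] (a repeated position would loop forever), so it has at most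
-- 2*len+3 links and the counter 2*len+4 is never exhausted on admitted inputs.
-- `(… ).getD 0` only covers the case where Python's int(·, 16) raises
-- ValueError, which Pre_ excludes.
def pvGoA (s : String) (steps : Nat) (start : Int) (parts : List String) : List String :=
  match steps with
  | 0 => parts
  | f + 1 =>
    let part_start := start + 2
    let len_octet := PySem.Str.slice s (some start) (some part_start)
    if len_octet = "" then parts
    else
      let part_end := part_start + (PySem.Int.ofStrBase? len_octet 16).getD 0 * 2
      let parts2 := parts ++ [PySem.Str.slice s (some part_start) (some part_end)]
      if PySem.Str.slice s (some part_end) (some (part_end + 2)) = "00" ∨ part_end > PySem.Str.len s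
      then parts2
      else pvGoA s f part_end parts2

def get_address_partition_from_decompressed_address (decompressed_address : String) (start : Int) (parts : List String) : List String :=
  pvGoA decompressed_address (2 * decompressed_address.toList.length + 4) start parts

-- ===== PORT B =====
-- pass 1 of Source B: the while loop collecting `positions` (same step counter as A's port)
def pvPositions (s : String) (steps : Nat) (idx : Int) (acc : List Int) : List Int :=
  match steps with
  | 0 => acc
  | f + 1 =>
    if PySem.Str.slice s (some idx) (some (idx + 2)) = "" then acc
    else
      let acc2 := acc ++ [idx]
      let e := idx + 2 + (PySem.Int.ofStrBase? (PySem.Str.slice s (some idx) (some (idx + 2))) 16).getD 0 * 2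
      if PySem.Str.slice s (some e) (some (e + 2)) = "00" ∨ e > PySem.Str.len s
      then acc2
      else pvPositions s f e acc2

-- body of pass 2 of Source B: the slice appended for position p
def pvPart (s : String) (p : Int) : String :=
  PySem.Str.slice s (some (p + 2)) (some (p + 2 + (PySem.Int.ofStrBase? (PySem.Str.slice s (some p) (some (p + 2))) 16).getD 0 * 2))

def get_address_partition_from_decompressed_address_alt (decompressed_address : String) (start : Int) (parts : List String) : List String :=
  (pvPositions decompressed_address (2 * decompressed_address.toList.length + 4) start []).foldl
    (fun ps p => ps ++ [pvPart decompressed_address p]) parts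

-- ===== PRECONDITION & SPEC =====
-- One step of the scan, as seen by Pre_: at position i the octet s[i:i+2] is
-- either empty (the scan returns), or it must parse as hex (else int raises
-- ValueError) and the scan either hits a terminator or moves on; k bounds the
-- remaining positions a terminating scan can still visit (pairwise distinct in
-- [-(len+1), len], hence ≤ 2*len+3 of them; exhaustion = Python's infinite
-- recursion, a RecursionError).
def pvOctetsOk (s : String) : Nat → Int → Bool
  | 0, _ => false
  | k + 1, i => PySem.Str.slice s (some i) (some (i + 2)) = "" || (match PySem.Int.ofStrBase? (PySem.Str.slice s (some i) (some (i + 2))) 16 with | none => false | some v => PySem.Str.slice s (some (i + 2 + v * 2)) (some (i + 2 + v * 2 + 2)) = "00" || i + 2 + v * 2 > PySem.Str.len s || pvOctetsOk s k (i + 2 + v * 2))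

-- Pre_ admits exactly the inputs on which A returns: it excludes only the
-- inputs where A raises — a ValueError from int(·,16) on a length octet the
-- scan actually reads, or the infinite recursion (RecursionError) a
-- negative-valued octet such as '-1' can cause.  No input on which A returns
-- a value is excluded.
def Pre_get_address_partition_from_decompressed_address (decompressed_address : String) (start : Int) (parts : List String) : Prop :=
  pvOctetsOk decompressed_address (2 * decompressed_address.toList.length + 4) start = true
instance (decompressed_address : String) (start : Int) (parts : List String) : Decidable (Pre_get_address_partition_from_decompressed_address decompressed_address start parts) := by unfold Pre_get_address_partition_from_decompressed_address; infer_instance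

def pvWitness_get_address_partition_from_decompressed_address : String × Int × List String := ("0132010000", 0, [])

def Spec_get_address_partition_from_decompressed_address (decompressed_address : String) (start : Int) (parts : List String) (out : List String) : Prop := out = get_address_partition_from_decompressed_address_alt decompressed_address start parts
instance (decompressed_address : String) (start : Int) (parts : List String) (out : List String) : Decidable (Spec_get_address_partition_from_decompressed_address decompressed_address start parts out) := by unfold Spec_get_address_partition_from_decompressed_address; infer_instance

-- ===== CLAIM (what is proved, stated in full; the proofs are below) =====
def Claim_equal_get_address_partition_from_decompressed_address : Prop := ∀ (decompressed_address : String) (start : Int) (parts : List String), Dom_get_address_partition_from_decompressed_address decompressed_address start parts → Pre_get_address_partition_from_decompressed_address decompressed_address start parts → Spec_get_address_partition_from_decompressed_address decompressed_address start parts (get_address_partition_from_decompressed_address decompressed_address start parts)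

-- ===== LEMMAS AND PROOFS =====

-- pass 1 is accumulator-independent
theorem pvPositions_acc (s : String) (steps : Nat) :
    ∀ (idx : Int) (acc : List Int),
      pvPositions s steps idx acc = acc ++ pvPositions s steps idx [] := by
  induction steps with
  | zero => intro idx acc; simp [pvPositions]
  | succ f ih =>
    intro idx acc
    simp only [pvPositions]
    split_ifs with h1 h2
    · simp
    · simp
    · rw [ih _ (acc ++ [idx]), ih _ ([] ++ [idx])]
      simp

-- A's recursion computes `parts` followed by the parts named by B's positions
theorem pvGoA_eq (s : String) (steps : Nat) :
    ∀ (start : Int) (parts : List String),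
      pvGoA s steps start parts = parts ++ (pvPositions s steps start []).map (pvPart s) := by
  induction steps with
  | zero => intro start parts; simp [pvGoA, pvPositions]
  | succ f ih =>
    intro start parts
    simp only [pvGoA, pvPositions]
    split_ifs with h1 h2
    · simp
    · simp [pvPart]
    · rw [ih, pvPositions_acc s f _ ([] ++ [start])]
      simp [pvPart]

-- ===== VERDICT (by name: the statement is the Claim_ definition above) =====
theorem get_address_partition_from_decompressed_address_spec : Claim_equal_get_address_partition_from_decompressed_address := by
  intro s start parts _ _
  unfold Spec_get_address_partition_from_decompressed_address
  unfold get_address_partition_from_decompressed_address get_address_partition_from_decompressed_address_alt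
  rw [pvGoA_eq, PySem.List.foldl_append_singleton_eq_map]
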